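-- pv_equiv track=rewrite | github.com/RenauxLouis/Value-Investing-10K-Files-Server | sec_downloader.py | year_missing
-- ===== SOURCE A (Python) =====
-- def year_missing(years_filed):
--
--     def _has_duplicate_items(_list):
--         return len(_list) != len(set(_list))
--
--     def _has_missing_year(years):
--
--         years_as_int = [int(year) for year in years]
--         min_year = min(years_as_int)
--         max_year = max(years_as_int)
--         years_range_set = set(range(min_year, max_year + 1))
--
--         return years_range_set.issubset(set(years_as_int))
--
--     return _has_duplicate_items(years_filed) or _has_missing_year(years_filed)
-- ===== SOURCE B (Python) =====
-- def year_missing(years_filed):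
--     seen = set()
--     for y in years_filed:
--         if y in seen:
--             return True
--         seen.add(y)
--     ints = sorted({int(y) for y in years_filed})
--     return ints[-1] - ints[0] + 1 == len(ints)
-- ===== Notes on version B (the rewrite author's own statement) =====
-- stated objective: simpler
-- what changed: Duplicate detection becomes a single early-return scan with a growing seen-set, and the all-years-present test becomes the closed-form count check last-first+1 == len on the sorted distinct ints, instead of materializing set(range(min,max+1)) and calling issubset.
import Mathlib
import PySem

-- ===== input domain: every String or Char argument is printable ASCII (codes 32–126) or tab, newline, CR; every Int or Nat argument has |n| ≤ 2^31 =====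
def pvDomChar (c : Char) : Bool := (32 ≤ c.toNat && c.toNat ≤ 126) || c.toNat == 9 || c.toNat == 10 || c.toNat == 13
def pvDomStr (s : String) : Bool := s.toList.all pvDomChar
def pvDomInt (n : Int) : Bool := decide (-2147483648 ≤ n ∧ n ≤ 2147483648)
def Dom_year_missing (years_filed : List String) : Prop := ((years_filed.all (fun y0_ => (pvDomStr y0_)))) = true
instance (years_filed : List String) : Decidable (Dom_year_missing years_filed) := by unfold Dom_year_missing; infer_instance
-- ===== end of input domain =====

-- B replaces A's length-vs-set duplicate test by an early-return scan with a growing seen-set, and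
-- A's set(range(min,max+1)).issubset test by the closed-form count check last - first + 1 == len on
-- the sorted distinct ints (objective: simpler).

-- ===== PORT A =====
def year_missing (years_filed : List String) : Bool :=
  -- _has_duplicate_items(years_filed) or _has_missing_year(years_filed), short-circuit
  if years_filed.length ≠ (PySem.Set.ofList years_filed).length then true
  else
    -- int(year): ValueError (none) is excluded by Pre_, so the getD 0 default is never reached
    let years_as_int := years_filed.map (fun y => (PySem.Int.ofStr? y).getD 0)
    let min_year := (PySem.List.min? years_as_int (fun x => x)).getD 0  -- min([]) excluded by Pre_
    let max_year := (PySem.List.max? years_as_int (fun x => x)).getD 0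
    let years_range_set := PySem.Set.ofList (PySem.List.pyRange min_year (max_year + 1) 1)
    PySem.Set.issubset years_range_set (PySem.Set.ofList years_as_int)

-- ===== PORT B =====
-- the for-loop over years_filed with its early `return True`
def ymDupScan : List String → PySem.Set String → Bool
  | [], _ => false
  | y :: rest, seen => if y ∈ seen then true else ymDupScan rest (PySem.Set.add seen y)

def year_missing_alt (years_filed : List String) : Bool :=
  if ymDupScan years_filed PySem.Set.empty then true
  else
    let ints := PySem.List.sorted (PySem.Set.ofList (years_filed.map (fun y => (PySem.Int.ofStr? y).getD 0))) (fun x => x) false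
    decide ((PySem.List.pyGet? ints (-1)).getD 0 - (PySem.List.pyGet? ints 0).getD 0 + 1 = (ints.length : Int))

-- ===== PRECONDITION & SPEC =====
-- Pre_ excludes only inputs on which BOTH programs raise: the empty list (A: ValueError in min,
-- B: IndexError) and duplicate-free lists containing a string int() rejects (both: ValueError).
def Pre_year_missing (years_filed : List String) : Prop :=
  years_filed ≠ [] ∧ (¬ years_filed.Nodup ∨ ∀ y ∈ years_filed, (PySem.Int.ofStr? y).isSome)
instance (years_filed : List String) : Decidable (Pre_year_missing years_filed) := by unfold Pre_year_missing; infer_instance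
def pvWitness_year_missing : List String := ["2019", "2021", "2020"]

def Spec_year_missing (years_filed : List String) (out : Bool) : Prop := out = year_missing_alt years_filed
instance (years_filed : List String) (out : Bool) : Decidable (Spec_year_missing years_filed out) := by unfold Spec_year_missing; infer_instance

-- ===== CLAIM (what is proved, stated in full; the proofs are below) =====
def Claim_equal_year_missing : Prop := ∀ (years_filed : List String), Dom_year_missing years_filed → Pre_year_missing years_filed → Spec_year_missing years_filed (year_missing years_filed)

-- ===== LEMMAS AND PROOFS =====

lemma ymDupScan_eq_false_iff (ys : List String) (seen : PySem.Set String) :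
    ymDupScan ys seen = false ↔ (ys.Nodup ∧ ∀ y ∈ ys, y ∉ seen) := by
  induction ys generalizing seen with
  | nil => simp [ymDupScan]
  | cons y rest ih =>
    by_cases h : y ∈ seen
    · simp [ymDupScan, h]
    · rw [show ymDupScan (y :: rest) seen = ymDupScan rest (PySem.Set.add seen y) from by
        simp [ymDupScan, h], ih]
      constructor
      · rintro ⟨hn, hall⟩
        have hy : y ∉ rest := fun hy => (hall y hy) (by simp [PySem.Set.mem_add])
        refine ⟨List.nodup_cons.mpr ⟨hy, hn⟩, ?_⟩
        intro z hz
        rcases List.mem_cons.mp hz with rfl | hz'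
        · exact h
        · intro hza; exact hall z hz' (by rw [PySem.Set.mem_add]; exact Or.inl hza)
      · rintro ⟨hn, hall⟩
        obtain ⟨hy, hn'⟩ := List.nodup_cons.mp hn
        refine ⟨hn', ?_⟩
        intro z hz hza
        rcases (PySem.Set.mem_add seen y z).mp hza with hzs | rfl
        · exact hall z (List.mem_cons_of_mem _ hz) hzs
        · exact hy hz

lemma ym_len_ofList_eq_iff (ys : List String) :
    (PySem.Set.ofList ys).length = ys.length ↔ ys.Nodup := by
  have h1 : (PySem.Set.ofList ys).toFinset = ys.toFinset := by
    ext x; simp [PySem.Set.mem_ofList]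
  have h2 : (PySem.Set.ofList ys).length = ys.dedup.length := by
    rw [← List.toFinset_card_of_nodup (PySem.Set.nodup_ofList ys), h1, List.card_toFinset]
  rw [h2]
  constructor
  · intro h
    rw [← (List.dedup_sublist ys).eq_of_length h]
    exact List.nodup_dedup ys
  · intro h
    rw [List.dedup_eq_self.mpr h]

lemma ym_core (S : List Int) (hS : S.Nodup) (mn mx : Int)
    (hmn : mn ∈ S)
    (hlo : ∀ x ∈ S, mn ≤ x) (hhi : ∀ x ∈ S, x ≤ mx) :
    ((∀ k, mn ≤ k → k < mx + 1 → k ∈ S) ↔ (mx - mn + 1 = (S.length : Int))) := by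
  have hsub : S.toFinset ⊆ Finset.Icc mn mx := by
    intro x hx
    rw [List.mem_toFinset] at hx
    exact Finset.mem_Icc.mpr ⟨hlo x hx, hhi x hx⟩
  have hcard : S.toFinset.card = S.length := List.toFinset_card_of_nodup hS
  have hmnmx : mn ≤ mx := hhi mn hmn
  have hicc : (Finset.Icc mn mx).card = (mx + 1 - mn).toNat := Int.card_Icc mn mx
  constructor
  · intro h
    have hsup : Finset.Icc mn mx ⊆ S.toFinset := by
      intro k hk
      rw [Finset.mem_Icc] at hk
      exact List.mem_toFinset.mpr (h k hk.1 (by omega))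
    have heq := Finset.Subset.antisymm hsub hsup
    have hc : S.length = (mx + 1 - mn).toNat := by rw [← hcard, heq, hicc]
    omega
  · intro h
    have hle : (Finset.Icc mn mx).card ≤ S.toFinset.card := by rw [hcard, hicc]; omega
    have heq : S.toFinset = Finset.Icc mn mx := Finset.eq_of_subset_of_card_le hsub hle
    intro k h1 h2
    exact List.mem_toFinset.mp (heq ▸ Finset.mem_Icc.mpr ⟨h1, by omega⟩)


lemma ym_nodup_case (ints : List Int) (hne : ints ≠ []) :
    PySem.Set.issubset
      (PySem.Set.ofList (PySem.List.pyRange ((PySem.List.min? ints (fun x => x)).getD 0)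
        (((PySem.List.max? ints (fun x => x)).getD 0) + 1) 1))
      (PySem.Set.ofList ints)
    = decide ((PySem.List.pyGet? (PySem.List.sorted (PySem.Set.ofList ints) (fun x => x) false) (-1)).getD 0
        - (PySem.List.pyGet? (PySem.List.sorted (PySem.Set.ofList ints) (fun x => x) false) 0).getD 0 + 1
        = ((PySem.List.sorted (PySem.Set.ofList ints) (fun x => x) false).length : Int)) := by
  obtain ⟨m, hm⟩ : ∃ m, PySem.List.min? ints (fun x => x) = some m := by
    cases hmin : PySem.List.min? ints (fun x => x) with
    | none => rw [PySem.List.min?_eq_none_iff] at hmin; exact absurd hmin hne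
    | some m => exact ⟨m, rfl⟩
  obtain ⟨M, hM⟩ : ∃ M, PySem.List.max? ints (fun x => x) = some M := by
    cases hmax : PySem.List.max? ints (fun x => x) with
    | none => rw [PySem.List.max?_eq_none_iff] at hmax; exact absurd hmax hne
    | some M => exact ⟨M, rfl⟩
  have hmmem : m ∈ ints := PySem.List.min?_mem hm
  have hMmem : M ∈ ints := PySem.List.max?_mem hM
  have hmlo : ∀ x ∈ ints, m ≤ x := PySem.List.min?_isMin hm
  have hMhi : ∀ x ∈ ints, x ≤ M := PySem.List.max?_isMax hM
  set S : List Int := PySem.Set.ofList ints with hS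
  have hSnd : S.Nodup := PySem.Set.nodup_ofList ints
  have hSmem : ∀ x, x ∈ S ↔ x ∈ ints := fun x => PySem.Set.mem_ofList ints x
  set T : List Int := PySem.List.sorted S (fun x => x) false with hT
  have hTperm : T.Perm S := PySem.List.sorted_perm S (fun x => x) false
  have hTlen : T.length = S.length := hTperm.length_eq
  have hTmem : ∀ x, x ∈ T ↔ x ∈ ints := fun x => by rw [hTperm.mem_iff]; exact hSmem x
  have hTpos : 0 < T.length := by
    rcases List.length_pos_iff.mpr (show S ≠ [] from fun h0 => by
      have := (hSmem m).mpr hmmem; rw [h0] at this; exact absurd this (List.not_mem_nil)) with h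
    omega
  have hfirst : T[0]'(hTpos) = m := by
    have h1 : m ≤ T[0]'(hTpos) := hmlo _ ((hTmem _).mp (List.getElem_mem hTpos))
    obtain ⟨j, hj, hjm⟩ := List.getElem_of_mem ((hTmem m).mpr hmmem)
    have h2 := PySem.List.sorted_id_getElem_mono (xs := S) (p := 0) (q := j) (Nat.zero_le j) (by rw [← hT]; exact hj)
    rw [← hjm]
    have h2' : T[0]'(hTpos) ≤ T[j]'(hj) := h2
    omega
  have hlast : T[T.length - 1]'(by omega) = M := by
    have h1 : T[T.length - 1]'(by omega) ≤ M := hMhi _ ((hTmem _).mp (List.getElem_mem (by omega)))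
    obtain ⟨j, hj, hjm⟩ := List.getElem_of_mem ((hTmem M).mpr hMmem)
    have h2 := PySem.List.sorted_id_getElem_mono (xs := S) (p := j) (q := T.length - 1)
      (by omega) (by rw [← hT]; omega)
    rw [← hjm]
    have h2' : T[j]'(hj) ≤ T[T.length - 1]'(by omega) := h2
    omega
  rw [hm, hM]
  simp only [Option.getD_some]
  rw [PySem.List.pyGet?_neg_one, PySem.List.pyGet?_zero]
  rw [List.getLast?_eq_getElem?, List.getElem?_eq_getElem (by omega), List.getElem?_eq_getElem hTpos]
  simp only [Option.getD_some]
  rw [hfirst, hlast, hTlen]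
  have hiff := ym_core S hSnd m M ((hSmem m).mpr hmmem)
    (fun x hx => hmlo x ((hSmem x).mp hx)) (fun x hx => hMhi x ((hSmem x).mp hx))
  rw [Bool.eq_iff_iff]
  rw [PySem.Set.issubset_iff, decide_eq_true_iff]
  constructor
  · intro h
    refine hiff.mp ?_
    intro k h1 h2
    exact h k (by rw [PySem.Set.mem_ofList, PySem.List.mem_pyRange_one]; exact ⟨h1, h2⟩)
  · intro h x hx
    rw [PySem.Set.mem_ofList, PySem.List.mem_pyRange_one] at hx
    exact hiff.mpr h x hx.1 hx.2

theorem year_missing_spec : Claim_equal_year_missing := by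
  intro ys _hdom hpre
  unfold Spec_year_missing
  obtain ⟨hne, _⟩ := hpre
  by_cases hnd : ys.Nodup
  · have hA : ¬ (ys.length ≠ (PySem.Set.ofList ys).length) := by
      rw [(ym_len_ofList_eq_iff ys).mpr hnd]; simp
    have hB : ymDupScan ys PySem.Set.empty = false :=
      (ymDupScan_eq_false_iff ys PySem.Set.empty).mpr ⟨hnd, by intro y _ hy; simp [PySem.Set.empty] at hy⟩
    rw [year_missing, year_missing_alt, if_neg hA, if_neg (by rw [hB]; simp)]
    exact ym_nodup_case (ys.map (fun y => (PySem.Int.ofStr? y).getD 0)) (by simpa using hne)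
  · have hA : ys.length ≠ (PySem.Set.ofList ys).length := by
      intro h; exact hnd ((ym_len_ofList_eq_iff ys).mp h.symm)
    have hB : ymDupScan ys PySem.Set.empty = true := by
      cases hb : ymDupScan ys PySem.Set.empty with
      | false => exact absurd ((ymDupScan_eq_false_iff ys _).mp hb).1 hnd
      | true => rfl
    rw [year_missing, year_missing_alt, if_pos hA, if_pos (by rw [hB])]
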